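-- pv_equiv track=rewrite | github.com/michaelayoade/dotmac_erp | app/services/finance/import_export/base.py | detect_csv_format
-- ===== SOURCE A (Python) =====
-- from collections.abc import Callable, Sequence
--
-- def detect_csv_format(columns: Sequence[str]) -> str:
--     """
--     Detect the likely source format of the CSV based on column names.
--     Returns: "zoho", "quickbooks", "xero", "sage", "wave", "freshbooks", or "generic"
--     """
--     column_set = {c.lower() for c in columns}
--
--     # Zoho Books indicators
--     zoho_indicators = {
--         "account name",
--         "account type",
--         "zoho",
--         "display name as",
--         "currency code",
--     }
--     if len(column_set & zoho_indicators) >= 2: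
--         return "zoho"
--
--     # QuickBooks indicators
--     qb_indicators = {
--         "fullyqualifiedname",
--         "acctnum",
--         "txndate",
--         "docnumber",
--         "customerref",
--     }
--     if any(c in str(columns) for c in ["CustomerRef:", "VendorRef:", "AccountRef:"]):
--         return "quickbooks"
--     if len(column_set & qb_indicators) >= 1:
--         return "quickbooks"
--
--     # Xero indicators
--     xero_indicators = {
--         "contactname",
--         "*name",
--         "invoicenumber",
--         "duedate",
--         "emailaddress",
--     }
--     if any(c.startswith("*") for c in columns):
--         return "xero"
--     if len(column_set & xero_indicators) >= 2:
--         return "xero"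
--
--     # Sage indicators
--     sage_indicators = {"nominal code", "n/c", "t/c", "nominal name", "tax code"}
--     if len(column_set & sage_indicators) >= 2:
--         return "sage"
--
--     # Wave indicators
--     wave_indicators = {"transaction type", "transaction id", "transaction date"}
--     if len(column_set & wave_indicators) >= 2:
--         return "wave"
--
--     # FreshBooks indicators
--     fb_indicators = {"invoice #", "client name", "p.o. number"}
--     if len(column_set & fb_indicators) >= 2:
--         return "freshbooks"
--
--     return "generic"
-- ===== SOURCE B (Python) =====
-- _INDICATOR_FORMAT = {
--     "account name": "zoho", "account type": "zoho", "zoho": "zoho",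
--     "display name as": "zoho", "currency code": "zoho",
--     "fullyqualifiedname": "quickbooks", "acctnum": "quickbooks",
--     "txndate": "quickbooks", "docnumber": "quickbooks", "customerref": "quickbooks",
--     "contactname": "xero", "*name": "xero", "invoicenumber": "xero",
--     "duedate": "xero", "emailaddress": "xero",
--     "nominal code": "sage", "n/c": "sage", "t/c": "sage",
--     "nominal name": "sage", "tax code": "sage",
--     "transaction type": "wave", "transaction id": "wave", "transaction date": "wave",
--     "invoice #": "freshbooks", "client name": "freshbooks", "p.o. number": "freshbooks",
-- }
--
--
-- def detect_csv_format(columns):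
--     """
--     Detect the likely source format of the CSV based on column names.
--     Single pass over the columns: a reverse index (indicator -> format) turns
--     each distinct lowered column into at most one per-format hit count, and the
--     '*'-prefix flag is collected on the way; the thresholds are applied once at
--     the end, in the original precedence order.
--     """
--     hits = {}
--     starred = False
--     seen = set()
--     for c in columns:
--         if c.startswith("*"):
--             starred = True
--         lc = c.lower()
--         if lc in seen:
--             continue
--         seen.add(lc)
--         fmt = _INDICATOR_FORMAT.get(lc)
--         if fmt is not None:
--             hits[fmt] = hits.get(fmt, 0) + 1
--
--     if hits.get("zoho", 0) >= 2:
--         return "zoho"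
--     text = str(columns)
--     if "CustomerRef:" in text or "VendorRef:" in text or "AccountRef:" in text:
--         return "quickbooks"
--     if hits.get("quickbooks", 0) >= 1:
--         return "quickbooks"
--     if starred:
--         return "xero"
--     if hits.get("xero", 0) >= 2:
--         return "xero"
--     if hits.get("sage", 0) >= 2:
--         return "sage"
--     if hits.get("wave", 0) >= 2:
--         return "wave"
--     if hits.get("freshbooks", 0) >= 2:
--         return "freshbooks"
--     return "generic"
-- ===== Notes on version B (the rewrite author's own statement) =====
-- stated objective: alternative
-- what changed: Replaced the six per-format set-intersection tests with a single pass over the columns that uses a reverse index (indicator name -> format) and a dict of per-format hit counters plus a '*'-prefix flag, applying the thresholds once at the end in the original precedence order.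
import Mathlib
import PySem

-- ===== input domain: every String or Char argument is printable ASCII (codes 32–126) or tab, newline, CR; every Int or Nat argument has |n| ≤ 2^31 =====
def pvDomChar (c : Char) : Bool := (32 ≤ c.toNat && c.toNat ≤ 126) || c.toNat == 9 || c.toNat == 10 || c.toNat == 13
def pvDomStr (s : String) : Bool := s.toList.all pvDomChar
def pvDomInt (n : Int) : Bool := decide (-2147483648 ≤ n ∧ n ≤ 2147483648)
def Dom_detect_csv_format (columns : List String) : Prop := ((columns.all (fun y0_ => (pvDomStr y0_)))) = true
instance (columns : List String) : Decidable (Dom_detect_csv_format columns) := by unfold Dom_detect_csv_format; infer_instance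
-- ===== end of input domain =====

-- B replaces A's six staged indicator-set intersections by one pass over the columns with a
-- reverse index (indicator -> format) and per-format hit counters (objective: alternative).

-- ===== PORT A =====
-- Hand port of Python's repr of one string (str() of a list calls repr on the elements):
-- exact on the Dom_ character set (printable ASCII, tab, newline, CR) — the only escapes
-- CPython produces there are \\, \t, \n, \r and the chosen quote character.
def pyReprChars (q : Char) (cs : List Char) : List Char :=
  cs.flatMap (fun c =>
    if c = '\\' then ['\\', '\\']
    else if c = '\t' then ['\\', 't']
    else if c = '\n' then ['\\', 'n']
    else if c = '\r' then ['\\', 'r']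
    else if c = q then ['\\', q]
    else [c])

-- repr(s): single quotes unless s contains ' and no "
def pyReprStr (s : String) : String :=
  let cs := s.toList
  let q : Char := if cs.contains '\'' && !(cs.contains '"') then '"' else '\''
  String.ofList (q :: (pyReprChars q cs ++ [q]))

-- str(columns) for a list of strings: '[' ++ comma-separated reprs ++ ']'
def pyReprList (columns : List String) : String :=
  String.ofList ('[' :: (List.intercalate [',', ' '] (columns.map (fun s => (pyReprStr s).toList))) ++ [']'])

def detect_csv_format (columns : List String) : String :=
  let column_set : PySem.Set String := PySem.Set.ofList (columns.map PySem.Str.lower)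
  let zoho_indicators : List String :=
    ["account name", "account type", "zoho", "display name as", "currency code"]
  if 2 ≤ PySem.Set.len (PySem.Set.inter column_set zoho_indicators) then "zoho"
  else
    let qb_indicators : List String :=
      ["fullyqualifiedname", "acctnum", "txndate", "docnumber", "customerref"]
    if (["CustomerRef:", "VendorRef:", "AccountRef:"] : List String).any
        (fun c => PySem.Str.isIn c (pyReprList columns)) then "quickbooks"
    else if 1 ≤ PySem.Set.len (PySem.Set.inter column_set qb_indicators) then "quickbooks"
    else
      let xero_indicators : List String :=
        ["contactname", "*name", "invoicenumber", "duedate", "emailaddress"]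
      if columns.any (fun c => PySem.Str.startswith c "*") then "xero"
      else if 2 ≤ PySem.Set.len (PySem.Set.inter column_set xero_indicators) then "xero"
      else
        let sage_indicators : List String :=
          ["nominal code", "n/c", "t/c", "nominal name", "tax code"]
        if 2 ≤ PySem.Set.len (PySem.Set.inter column_set sage_indicators) then "sage"
        else
          let wave_indicators : List String :=
            ["transaction type", "transaction id", "transaction date"]
          if 2 ≤ PySem.Set.len (PySem.Set.inter column_set wave_indicators) then "wave"
          else
            let fb_indicators : List String :=
              ["invoice #", "client name", "p.o. number"]
            if 2 ≤ PySem.Set.len (PySem.Set.inter column_set fb_indicators) then "freshbooks"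
            else "generic"

-- ===== PORT B =====
-- the module-level reverse index _INDICATOR_FORMAT of Source B
def indicatorFormat : PySem.Dict String String :=
  PySem.Dict.ofList
    [("account name", "zoho"), ("account type", "zoho"), ("zoho", "zoho"),
     ("display name as", "zoho"), ("currency code", "zoho"),
     ("fullyqualifiedname", "quickbooks"), ("acctnum", "quickbooks"),
     ("txndate", "quickbooks"), ("docnumber", "quickbooks"), ("customerref", "quickbooks"),
     ("contactname", "xero"), ("*name", "xero"), ("invoicenumber", "xero"),
     ("duedate", "xero"), ("emailaddress", "xero"),
     ("nominal code", "sage"), ("n/c", "sage"), ("t/c", "sage"),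
     ("nominal name", "sage"), ("tax code", "sage"),
     ("transaction type", "wave"), ("transaction id", "wave"), ("transaction date", "wave"),
     ("invoice #", "freshbooks"), ("client name", "freshbooks"), ("p.o. number", "freshbooks")]

-- the for-loop of Source B: state is (hits, starred, seen)
def bLoop : List String → (PySem.Dict String Int × Bool × PySem.Set String) →
    (PySem.Dict String Int × Bool × PySem.Set String)
  | [], st => st
  | c :: rest, (hits, starred, seen) =>
      let starred := starred || PySem.Str.startswith c "*"
      let lc := PySem.Str.lower c
      if PySem.Set.contains seen lc then bLoop rest (hits, starred, seen)
      else
        let seen := PySem.Set.add seen lc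
        match PySem.Dict.get? indicatorFormat lc with
        | some fmt => bLoop rest (hits.insert fmt (hits.getD fmt 0 + 1), starred, seen)
        | none => bLoop rest (hits, starred, seen)

def detect_csv_format_alt (columns : List String) : String :=
  let st := bLoop columns (PySem.Dict.empty, false, PySem.Set.empty)
  let hits := st.1
  let starred := st.2.1
  if 2 ≤ hits.getD "zoho" 0 then "zoho"
  else
    let text := pyReprList columns
    if PySem.Str.isIn "CustomerRef:" text || PySem.Str.isIn "VendorRef:" text
        || PySem.Str.isIn "AccountRef:" text then "quickbooks"
    else if 1 ≤ hits.getD "quickbooks" 0 then "quickbooks"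
    else if starred then "xero"
    else if 2 ≤ hits.getD "xero" 0 then "xero"
    else if 2 ≤ hits.getD "sage" 0 then "sage"
    else if 2 ≤ hits.getD "wave" 0 then "wave"
    else if 2 ≤ hits.getD "freshbooks" 0 then "freshbooks"
    else "generic"

-- ===== PRECONDITION & SPEC =====
def Spec_detect_csv_format (columns : List String) (out : String) : Prop := out = detect_csv_format_alt columns
instance (columns : List String) (out : String) : Decidable (Spec_detect_csv_format columns out) := by unfold Spec_detect_csv_format; infer_instance

-- ===== CLAIM (what is proved, stated in full; the proofs are below) =====
def Claim_equal_detect_csv_format : Prop := ∀ (columns : List String), Dom_detect_csv_format columns → Spec_detect_csv_format columns (detect_csv_format columns)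

-- ===== LEMMAS AND PROOFS =====

-- the reverse index as a literal items list (Source B's module-level dict, evaluated)
theorem indicatorFormat_items : indicatorFormat.items =
    [("account name", "zoho"), ("account type", "zoho"), ("zoho", "zoho"),
     ("display name as", "zoho"), ("currency code", "zoho"),
     ("fullyqualifiedname", "quickbooks"), ("acctnum", "quickbooks"),
     ("txndate", "quickbooks"), ("docnumber", "quickbooks"), ("customerref", "quickbooks"),
     ("contactname", "xero"), ("*name", "xero"), ("invoicenumber", "xero"),
     ("duedate", "xero"), ("emailaddress", "xero"),
     ("nominal code", "sage"), ("n/c", "sage"), ("t/c", "sage"),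
     ("nominal name", "sage"), ("tax code", "sage"),
     ("transaction type", "wave"), ("transaction id", "wave"), ("transaction date", "wave"),
     ("invoice #", "freshbooks"), ("client name", "freshbooks"), ("p.o. number", "freshbooks")] := by
  decide

-- pointwise: the reverse index maps x to format f exactly when x is in f's indicator list
set_option maxRecDepth 8000 in
theorem fmt_zoho (x : String) :
    (PySem.Dict.get? indicatorFormat x == some "zoho")
      = (["account name", "account type", "zoho", "display name as", "currency code"] : List String).contains x := by
  simp only [PySem.Dict.get?, indicatorFormat_items, List.find?, List.contains, List.elem_cons, List.elem_nil]
  repeat' split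
  all_goals simp_all

set_option maxRecDepth 8000 in
theorem fmt_qb (x : String) :
    (PySem.Dict.get? indicatorFormat x == some "quickbooks")
      = (["fullyqualifiedname", "acctnum", "txndate", "docnumber", "customerref"] : List String).contains x := by
  simp only [PySem.Dict.get?, indicatorFormat_items, List.find?, List.contains, List.elem_cons, List.elem_nil]
  repeat' split
  all_goals simp_all
  all_goals (subst_vars; simp_all)

set_option maxRecDepth 8000 in
theorem fmt_xero (x : String) :
    (PySem.Dict.get? indicatorFormat x == some "xero")
      = (["contactname", "*name", "invoicenumber", "duedate", "emailaddress"] : List String).contains x := by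
  simp only [PySem.Dict.get?, indicatorFormat_items, List.find?, List.contains, List.elem_cons, List.elem_nil]
  repeat' split
  all_goals simp_all
  all_goals (subst_vars; simp_all)

set_option maxRecDepth 8000 in
theorem fmt_sage (x : String) :
    (PySem.Dict.get? indicatorFormat x == some "sage")
      = (["nominal code", "n/c", "t/c", "nominal name", "tax code"] : List String).contains x := by
  simp only [PySem.Dict.get?, indicatorFormat_items, List.find?, List.contains, List.elem_cons, List.elem_nil]
  repeat' split
  all_goals simp_all
  all_goals (subst_vars; simp_all)

set_option maxRecDepth 8000 in
theorem fmt_wave (x : String) :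
    (PySem.Dict.get? indicatorFormat x == some "wave")
      = (["transaction type", "transaction id", "transaction date"] : List String).contains x := by
  simp only [PySem.Dict.get?, indicatorFormat_items, List.find?, List.contains, List.elem_cons, List.elem_nil]
  repeat' split
  all_goals simp_all
  all_goals (subst_vars; simp_all)

set_option maxRecDepth 8000 in
theorem fmt_fb (x : String) :
    (PySem.Dict.get? indicatorFormat x == some "freshbooks")
      = (["invoice #", "client name", "p.o. number"] : List String).contains x := by
  simp only [PySem.Dict.get?, indicatorFormat_items, List.find?, List.contains, List.elem_cons, List.elem_nil]
  repeat' split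
  all_goals simp_all
  all_goals (subst_vars; simp_all)

-- a format's hit count = size of the intersection of the lowered-column set with its indicator list
theorem count_eq_inter (cs : PySem.Set String) (f : String) (ind : List String)
    (hpt : ∀ x, (PySem.Dict.get? indicatorFormat x == some f) = ind.contains x) :
    ((cs.filter (fun lc => PySem.Dict.get? indicatorFormat lc == some f)).length : Int)
      = PySem.Set.len (PySem.Set.inter cs ind) := by
  simp only [PySem.Set.inter, PySem.Set.len, PySem.Set.contains]
  congr 2
  exact List.filter_congr (fun x _ => hpt x)

-- loop invariant for bLoop: the hit counters count the indicator columns among the distinct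
-- lowered columns seen so far, and the flag records whether a '*'-column was passed
theorem bLoop_inv (L : List String) (hits : PySem.Dict String Int) (starred : Bool)
    (seen : PySem.Set String)
    (h : ∀ f, hits.getD f 0 = ((seen.filter
        (fun lc => PySem.Dict.get? indicatorFormat lc == some f)).length : Int)) :
    (∀ f, (bLoop L (hits, starred, seen)).1.getD f 0
        = (((PySem.Set.update seen (L.map PySem.Str.lower)).filter
            (fun lc => PySem.Dict.get? indicatorFormat lc == some f)).length : Int))
    ∧ (bLoop L (hits, starred, seen)).2.1
        = (starred || L.any (fun c => PySem.Str.startswith c "*")) := by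
  induction L generalizing hits starred seen with
  | nil =>
    refine ⟨fun f => ?_, by simp [bLoop]⟩
    simpa [bLoop, PySem.Set.update] using h f
  | cons c rest ih =>
    have hupd : PySem.Set.update seen ((c :: rest).map PySem.Str.lower)
        = PySem.Set.update (PySem.Set.add seen (PySem.Str.lower c)) (rest.map PySem.Str.lower) := by
      simp [PySem.Set.update]
    by_cases hc : PySem.Set.contains seen (PySem.Str.lower c) = true
    · have hc' : PySem.Str.lower c ∈ seen := by
        simpa [PySem.Set.contains] using hc
      have hadd : PySem.Set.add seen (PySem.Str.lower c) = seen := by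
        simp [PySem.Set.add, PySem.Set.contains, hc']
      have hstep : bLoop (c :: rest) (hits, starred, seen)
          = bLoop rest (hits, starred || PySem.Str.startswith c "*", seen) := by
        simp only [bLoop]
        rw [if_pos hc]
      obtain ⟨h1, h2⟩ := ih hits (starred || PySem.Str.startswith c "*") seen h
      refine ⟨fun f => ?_, ?_⟩
      · rw [hstep, hupd, hadd]; exact h1 f
      · rw [hstep, h2, List.any_cons, Bool.or_assoc]
    · have hc' : PySem.Str.lower c ∉ seen := by
        simpa [PySem.Set.contains] using hc
      have hadd : PySem.Set.add seen (PySem.Str.lower c) = seen ++ [PySem.Str.lower c] := by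
        simp [PySem.Set.add, PySem.Set.contains, hc']
      cases hget : PySem.Dict.get? indicatorFormat (PySem.Str.lower c) with
      | some f0 =>
        have hstep : bLoop (c :: rest) (hits, starred, seen)
            = bLoop rest (hits.insert f0 (hits.getD f0 0 + 1),
                starred || PySem.Str.startswith c "*", PySem.Set.add seen (PySem.Str.lower c)) := by
          simp only [bLoop, hget]
          rw [if_neg hc]
        have h' : ∀ f, (hits.insert f0 (hits.getD f0 0 + 1)).getD f 0
            = (((seen ++ [PySem.Str.lower c]).filter
                (fun lc => PySem.Dict.get? indicatorFormat lc == some f)).length : Int) := by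
          intro f
          rw [PySem.Dict.getD_insert]
          by_cases hf : f = f0
          · subst hf
            simp [List.filter_append, hget, h f]
          · have hne : (PySem.Dict.get? indicatorFormat (PySem.Str.lower c) == some f) = false := by
              simp [hget, Ne.symm hf]
            simp [List.filter_append, hne, h f, hf]
        obtain ⟨h1, h2⟩ := ih (hits.insert f0 (hits.getD f0 0 + 1))
          (starred || PySem.Str.startswith c "*") (seen ++ [PySem.Str.lower c]) h'
        refine ⟨fun f => ?_, ?_⟩
        · rw [hstep, hupd, hadd]; exact h1 f
        · rw [hstep, hadd, h2, List.any_cons, Bool.or_assoc]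
      | none =>
        have hstep : bLoop (c :: rest) (hits, starred, seen)
            = bLoop rest (hits, starred || PySem.Str.startswith c "*",
                PySem.Set.add seen (PySem.Str.lower c)) := by
          simp only [bLoop, hget]
          rw [if_neg hc]
        have h' : ∀ f, hits.getD f 0
            = (((seen ++ [PySem.Str.lower c]).filter
                (fun lc => PySem.Dict.get? indicatorFormat lc == some f)).length : Int) := by
          intro f
          have hne : (PySem.Dict.get? indicatorFormat (PySem.Str.lower c) == some f) = false := by
            simp [hget]
          simp [List.filter_append, hne, h f]
        obtain ⟨h1, h2⟩ := ih hits (starred || PySem.Str.startswith c "*")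
          (seen ++ [PySem.Str.lower c]) h'
        refine ⟨fun f => ?_, ?_⟩
        · rw [hstep, hupd, hadd]; exact h1 f
        · rw [hstep, hadd, h2, List.any_cons, Bool.or_assoc]

-- ===== VERDICT (by name: the statement is the Claim_ definition above) =====
theorem detect_csv_format_spec : Claim_equal_detect_csv_format := by
  intro columns _
  unfold Spec_detect_csv_format detect_csv_format detect_csv_format_alt
  obtain ⟨h1, h2⟩ := bLoop_inv columns PySem.Dict.empty false PySem.Set.empty
    (fun f => by simp [PySem.Dict.getD_empty])
  have hbase : PySem.Set.update PySem.Set.empty (columns.map PySem.Str.lower)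
      = PySem.Set.ofList (columns.map PySem.Str.lower) := rfl
  rw [hbase] at h1
  have hz := (h1 "zoho").trans (count_eq_inter _ _ _ fmt_zoho)
  have hq := (h1 "quickbooks").trans (count_eq_inter _ _ _ fmt_qb)
  have hx := (h1 "xero").trans (count_eq_inter _ _ _ fmt_xero)
  have hs := (h1 "sage").trans (count_eq_inter _ _ _ fmt_sage)
  have hw := (h1 "wave").trans (count_eq_inter _ _ _ fmt_wave)
  have hf := (h1 "freshbooks").trans (count_eq_inter _ _ _ fmt_fb)
  rw [Bool.false_or] at h2
  simp only [hz, hq, hx, hs, hw, hf, h2, List.any_cons, List.any_nil,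
    Bool.or_false, Bool.or_assoc]
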